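-- pv_equiv track=rewrite | github.com/satomi0219/othello2024 | bird26.py | is_stable
-- ===== SOURCE A (Python) =====
-- def is_stable(board, x, y, stone):
--     """
--     石が安定しているか（動かされる可能性がないか）を判定。
--     """
--     if board[y][x] != stone:
--         return False
--     directions = [(-1, -1), (-1, 0), (-1, 1), (0, -1), (0, 1), (1, -1), (1, 0), (1, 1)]
--     for dx, dy in directions:
--         nx, ny = x + dx, y + dy
--         while 0 <= nx < len(board[0]) and 0 <= ny < len(board):
--             if board[ny][nx] == 0:
--                 return False
--             nx += dx
--             ny += dy
--     return True
-- ===== SOURCE B (Python) =====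
-- def is_stable(board, x, y, stone):
--     if board[y][x] != stone:
--         return False
--     H = len(board)
--     W = len(board[0])
--     for j in range(W):
--         if j != x and board[y][j] == 0:
--             return False
--     for i in range(H):
--         if i != y and board[i][x] == 0:
--             return False
--     for i in range(H):
--         j = x + (i - y)
--         if i != y and 0 <= j < W and board[i][j] == 0:
--             return False
--     for i in range(H):
--         j = x - (i - y)
--         if i != y and 0 <= j < W and board[i][j] == 0:
--             return False
--     return True
-- ===== Notes on version B (the rewrite author's own statement) =====
-- stated objective: alternative
-- what changed: Replaces the eight outward ray while-loops with four single-pass scans over the full row, column, diagonal and anti-diagonal through (x,y) (skipping the centre), indexed by row/column number instead of stepping a cursor per direction.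
-- outside the precondition, e.g. on is_stable([[1, 1], [1, 0]], -1, 0, 1): A returns True, B returns False; on is_stable([[1, 1], [1, 1], [1]], 0, 0, 1): A returns True, B returns True
import Mathlib
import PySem

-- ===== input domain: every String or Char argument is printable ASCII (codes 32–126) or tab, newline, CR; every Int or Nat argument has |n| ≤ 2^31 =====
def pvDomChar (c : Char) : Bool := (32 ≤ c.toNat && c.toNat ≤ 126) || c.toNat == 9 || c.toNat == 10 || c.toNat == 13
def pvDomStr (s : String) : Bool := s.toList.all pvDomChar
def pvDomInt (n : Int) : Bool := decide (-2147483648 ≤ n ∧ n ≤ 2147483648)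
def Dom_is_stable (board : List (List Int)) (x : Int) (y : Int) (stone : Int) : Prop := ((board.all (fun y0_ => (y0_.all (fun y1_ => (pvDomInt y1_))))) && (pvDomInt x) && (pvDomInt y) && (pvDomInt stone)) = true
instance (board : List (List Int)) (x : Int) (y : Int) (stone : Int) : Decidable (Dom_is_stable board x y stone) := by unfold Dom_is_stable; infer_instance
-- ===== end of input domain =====

-- B replaces the eight outward ray loops with four single-pass scans of the full
-- row/column/diagonals through (x,y) (skipping the centre); objective: alternative decomposition.


-- ===== PORT A =====
-- board[i][j]; exact under Pre_ (indices in range, board rectangular), where no default is hit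
def pvGetCell (board : List (List Int)) (i j : Int) : Int :=
  PySem.List.pyGetD (PySem.List.pyGetD board i []) j 0

-- the inner while-loop of A; fuel W.toNat+H.toNat+1 only makes it total (the loop
-- leaves the board after at most max(W,H) steps, so the fuel is never exhausted)
def pvScan (board : List (List Int)) (W H dx dy : Int) : Int → Int → Nat → Bool
  | _, _, 0 => false
  | nx, ny, f + 1 =>
    if 0 ≤ nx ∧ nx < W ∧ 0 ≤ ny ∧ ny < H then
      if pvGetCell board ny nx = 0 then true
      else pvScan board W H dx dy (nx + dx) (ny + dy) f
    else false

def is_stable (board : List (List Int)) (x : Int) (y : Int) (stone : Int) : Bool :=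
  if pvGetCell board y x ≠ stone then false
  else
    let W : Int := ((board.headD []).length : Int)
    let H : Int := (board.length : Int)
    let dirs : List (Int × Int) := [(-1,-1),(-1,0),(-1,1),(0,-1),(0,1),(1,-1),(1,0),(1,1)]
    !(dirs.any fun d => pvScan board W H d.1 d.2 (x + d.1) (y + d.2) (W.toNat + H.toNat + 1))

-- ===== PORT B =====
def pvRowZero (board : List (List Int)) (W x y : Int) : Bool :=
  (PySem.List.pyRange 0 W 1).any (fun j => j != x && pvGetCell board y j == 0)

def pvColZero (board : List (List Int)) (H x y : Int) : Bool :=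
  (PySem.List.pyRange 0 H 1).any (fun i => i != y && pvGetCell board i x == 0)

def pvDiagZero (board : List (List Int)) (W H x y : Int) : Bool :=
  (PySem.List.pyRange 0 H 1).any
    (fun i => i != y && decide (0 ≤ x + (i - y) ∧ x + (i - y) < W) && pvGetCell board i (x + (i - y)) == 0)

def pvADiagZero (board : List (List Int)) (W H x y : Int) : Bool :=
  (PySem.List.pyRange 0 H 1).any
    (fun i => i != y && decide (0 ≤ x - (i - y) ∧ x - (i - y) < W) && pvGetCell board i (x - (i - y)) == 0)

def is_stable_alt (board : List (List Int)) (x : Int) (y : Int) (stone : Int) : Bool :=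
  if pvGetCell board y x ≠ stone then false
  else
    let H : Int := (board.length : Int)
    let W : Int := ((board.headD []).length : Int)
    if pvRowZero board W x y then false
    else if pvColZero board H x y then false
    else if pvDiagZero board W H x y then false
    else if pvADiagZero board W H x y then false
    else true

-- ===== PRECONDITION & SPEC =====
-- Pre_ admits any input on which both programs stop at the shared guard (the indexed cell is
-- a valid Python access and differs from stone), and otherwise the natural domain: (x,y) on the
-- board in ordinary (non-negative) coordinates with every row reaching the width len(board[0]).
-- It excludes boards with a row shorter than len(board[0]) when the scans run (A may raise
-- IndexError via the uniform len(board[0]) bound, or return a value depending accidentally on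
-- which missing cell a ray meets first) and out-of-range/negative x,y past the guard (A returns
-- via Python's negative-index wraparound mixed with one-sided rays, an implementation artefact).
def Pre_is_stable (board : List (List Int)) (x : Int) (y : Int) (stone : Int) : Prop :=
  board ≠ [] ∧ PySem.Raise.InRange board.length y ∧
  PySem.Raise.InRange (PySem.List.pyGetD board y []).length x ∧
  ((0 ≤ x ∧ 0 ≤ y ∧ (∀ row ∈ board, (board.headD []).length ≤ row.length) ∧
      x < ((board.headD []).length : Int)) ∨
    PySem.List.pyGetD (PySem.List.pyGetD board y []) x 0 ≠ stone)
instance (board : List (List Int)) (x : Int) (y : Int) (stone : Int) : Decidable (Pre_is_stable board x y stone) := by unfold Pre_is_stable; infer_instance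

def pvWitness_is_stable : List (List Int) × Int × Int × Int := ([[1, 1], [1, 2]], 0, 1, 1)

def Spec_is_stable (board : List (List Int)) (x : Int) (y : Int) (stone : Int) (out : Bool) : Prop := out = is_stable_alt board x y stone
instance (board : List (List Int)) (x : Int) (y : Int) (stone : Int) (out : Bool) : Decidable (Spec_is_stable board x y stone out) := by unfold Spec_is_stable; infer_instance

-- ===== CLAIM (what is proved, stated in full; the proofs are below) =====
def Claim_equal_is_stable : Prop := ∀ (board : List (List Int)) (x : Int) (y : Int) (stone : Int), Dom_is_stable board x y stone → Pre_is_stable board x y stone → Spec_is_stable board x y stone (is_stable board x y stone)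

-- ===== LEMMAS AND PROOFS =====

-- characterisation of the while-loop: a zero is found iff some visited (in-bounds prefix) cell is zero
theorem pvScan_iff (board : List (List Int)) (W H dx dy : Int) (f : Nat) :
    ∀ nx ny : Int, (pvScan board W H dx dy nx ny f = true ↔
      ∃ k : Nat, k < f ∧
        (∀ m : Nat, m ≤ k → (0 ≤ nx + m * dx ∧ nx + m * dx < W ∧ 0 ≤ ny + m * dy ∧ ny + m * dy < H)) ∧
        pvGetCell board (ny + k * dy) (nx + k * dx) = 0) := by
  induction f with
  | zero => intro nx ny; simp [pvScan]
  | succ f ih =>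
    intro nx ny
    rw [pvScan]
    by_cases hb : 0 ≤ nx ∧ nx < W ∧ 0 ≤ ny ∧ ny < H
    · rw [if_pos hb]
      by_cases hz : pvGetCell board ny nx = 0
      · rw [if_pos hz]
        constructor
        · intro _
          refine ⟨0, by omega, ?_, ?_⟩
          · intro m hm
            have hm0 : m = 0 := Nat.le_zero.mp hm
            subst hm0
            simpa using hb
          · simpa using hz
        · intro _; rfl
      · rw [if_neg hz, ih]
        constructor
        · rintro ⟨k, hk, hpre, hcell⟩
          refine ⟨k + 1, by omega, ?_, ?_⟩
          · intro m hm
            cases m with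
            | zero => simpa using hb
            | succ m =>
              have := hpre m (by omega)
              push_cast at this ⊢
              constructor; · linarith [this.1]
              constructor; · linarith [this.2.1]
              constructor; · linarith [this.2.2.1]
              · linarith [this.2.2.2]
          · have h1 : ny + (↑(k + 1) : Int) * dy = ny + dy + ↑k * dy := by push_cast; ring
            have h2 : nx + (↑(k + 1) : Int) * dx = nx + dx + ↑k * dx := by push_cast; ring
            rw [h1, h2]; exact hcell
        · rintro ⟨k, hk, hpre, hcell⟩
          cases k with
          | zero => exact absurd (by simpa using hcell) hz
          | succ k =>
            refine ⟨k, by omega, ?_, ?_⟩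
            · intro m hm
              have := hpre (m + 1) (by omega)
              push_cast at this ⊢
              constructor; · linarith [this.1]
              constructor; · linarith [this.2.1]
              constructor; · linarith [this.2.2.1]
              · linarith [this.2.2.2]
            · have h1 : ny + dy + (↑k : Int) * dy = ny + ↑(k + 1) * dy := by push_cast; ring
              have h2 : nx + dx + (↑k : Int) * dx = nx + ↑(k + 1) * dx := by push_cast; ring
              rw [h1, h2]; exact hcell
    · rw [if_neg hb]
      constructor
      · intro h; exact absurd h Bool.false_ne_true
      · rintro ⟨k, _, hpre, _⟩
        exact absurd (by simpa using hpre 0 (Nat.zero_le k)) hb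

-- the two horizontal rays together find a zero iff the row (minus the centre) holds one
theorem pvRow_pair (board : List (List Int)) (W H x y : Int)
    (hx : 0 ≤ x ∧ x < W) (hy : 0 ≤ y ∧ y < H) :
    (pvScan board W H 1 0 (x + 1) (y + 0) (W.toNat + H.toNat + 1) = true ∨
     pvScan board W H (-1) 0 (x + -1) (y + 0) (W.toNat + H.toNat + 1) = true) ↔
    (∃ j : Int, 0 ≤ j ∧ j < W ∧ j ≠ x ∧ pvGetCell board y j = 0) := by
  rw [pvScan_iff, pvScan_iff]
  constructor
  · rintro (⟨k, _, hpre, hcell⟩ | ⟨k, _, hpre, hcell⟩)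
    · refine ⟨x + 1 + k, ?_, ?_, by omega, ?_⟩
      · have := hpre k le_rfl; omega
      · have := hpre k le_rfl; omega
      · have h1 : y + 0 + (k : Int) * 0 = y := by ring
        have h2 : x + 1 + (k : Int) * 1 = x + 1 + k := by ring
        rwa [h1, h2] at hcell
    · refine ⟨x - 1 - k, ?_, ?_, by omega, ?_⟩
      · have := hpre k le_rfl; omega
      · have := hpre k le_rfl; omega
      · have h1 : y + 0 + (k : Int) * 0 = y := by ring
        have h2 : x + -1 + (k : Int) * (-1) = x - 1 - k := by ring
        rwa [h1, h2] at hcell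
  · rintro ⟨j, hj0, hjW, hjx, hcell⟩
    rcases lt_or_gt_of_ne hjx with hlt | hgt
    · right
      refine ⟨(x - 1 - j).toNat, by omega, ?_, ?_⟩
      · intro m hm; omega
      · have h1 : y + 0 + ((x - 1 - j).toNat : Int) * 0 = y := by omega
        have h2 : x + -1 + ((x - 1 - j).toNat : Int) * (-1) = j := by omega
        rw [h1, h2]; exact hcell
    · left
      refine ⟨(j - x - 1).toNat, by omega, ?_, ?_⟩
      · intro m hm; omega
      · have h1 : y + 0 + ((j - x - 1).toNat : Int) * 0 = y := by omega
        have h2 : x + 1 + ((j - x - 1).toNat : Int) * 1 = j := by omega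
        rw [h1, h2]; exact hcell

theorem pvCol_pair (board : List (List Int)) (W H x y : Int)
    (hx : 0 ≤ x ∧ x < W) (hy : 0 ≤ y ∧ y < H) :
    (pvScan board W H 0 1 (x + 0) (y + 1) (W.toNat + H.toNat + 1) = true ∨
     pvScan board W H 0 (-1) (x + 0) (y + -1) (W.toNat + H.toNat + 1) = true) ↔
    (∃ i : Int, 0 ≤ i ∧ i < H ∧ i ≠ y ∧ pvGetCell board i x = 0) := by
  rw [pvScan_iff, pvScan_iff]
  constructor
  · rintro (⟨k, _, hpre, hcell⟩ | ⟨k, _, hpre, hcell⟩)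
    · refine ⟨y + 1 + k, ?_, ?_, by omega, ?_⟩
      · have := hpre k le_rfl; omega
      · have := hpre k le_rfl; omega
      · have h1 : y + 1 + (k : Int) * 1 = y + 1 + k := by ring
        have h2 : x + 0 + (k : Int) * 0 = x := by ring
        rwa [h1, h2] at hcell
    · refine ⟨y - 1 - k, ?_, ?_, by omega, ?_⟩
      · have := hpre k le_rfl; omega
      · have := hpre k le_rfl; omega
      · have h1 : y + -1 + (k : Int) * (-1) = y - 1 - k := by ring
        have h2 : x + 0 + (k : Int) * 0 = x := by ring
        rwa [h1, h2] at hcell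
  · rintro ⟨i, hi0, hiH, hiy, hcell⟩
    rcases lt_or_gt_of_ne hiy with hlt | hgt
    · right
      refine ⟨(y - 1 - i).toNat, by omega, ?_, ?_⟩
      · intro m hm; omega
      · have h1 : y + -1 + ((y - 1 - i).toNat : Int) * (-1) = i := by omega
        have h2 : x + 0 + ((y - 1 - i).toNat : Int) * 0 = x := by omega
        rw [h1, h2]; exact hcell
    · left
      refine ⟨(i - y - 1).toNat, by omega, ?_, ?_⟩
      · intro m hm; omega
      · have h1 : y + 1 + ((i - y - 1).toNat : Int) * 1 = i := by omega
        have h2 : x + 0 + ((i - y - 1).toNat : Int) * 0 = x := by omega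
        rw [h1, h2]; exact hcell

theorem pvDiag_pair (board : List (List Int)) (W H x y : Int)
    (hx : 0 ≤ x ∧ x < W) (hy : 0 ≤ y ∧ y < H) :
    (pvScan board W H 1 1 (x + 1) (y + 1) (W.toNat + H.toNat + 1) = true ∨
     pvScan board W H (-1) (-1) (x + -1) (y + -1) (W.toNat + H.toNat + 1) = true) ↔
    (∃ i : Int, 0 ≤ i ∧ i < H ∧ i ≠ y ∧ 0 ≤ x + (i - y) ∧ x + (i - y) < W ∧
      pvGetCell board i (x + (i - y)) = 0) := by
  rw [pvScan_iff, pvScan_iff]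
  constructor
  · rintro (⟨k, _, hpre, hcell⟩ | ⟨k, _, hpre, hcell⟩)
    · have hb := hpre k le_rfl
      refine ⟨y + 1 + k, by omega, by omega, by omega, by omega, by omega, ?_⟩
      have h1 : y + 1 + (k : Int) * 1 = y + 1 + k := by ring
      have h2 : x + 1 + (k : Int) * 1 = x + (y + 1 + k - y) := by ring
      rwa [h1, h2] at hcell
    · have hb := hpre k le_rfl
      refine ⟨y - 1 - k, by omega, by omega, by omega, by omega, by omega, ?_⟩
      have h1 : y + -1 + (k : Int) * (-1) = y - 1 - k := by ring
      have h2 : x + -1 + (k : Int) * (-1) = x + (y - 1 - k - y) := by ring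
      rwa [h1, h2] at hcell
  · rintro ⟨i, hi0, hiH, hiy, hj0, hjW, hcell⟩
    rcases lt_or_gt_of_ne hiy with hlt | hgt
    · right
      refine ⟨(y - 1 - i).toNat, by omega, ?_, ?_⟩
      · intro m hm; omega
      · have h1 : y + -1 + ((y - 1 - i).toNat : Int) * (-1) = i := by omega
        have h2 : x + -1 + ((y - 1 - i).toNat : Int) * (-1) = x + (i - y) := by omega
        rw [h1, h2]; exact hcell
    · left
      refine ⟨(i - y - 1).toNat, by omega, ?_, ?_⟩
      · intro m hm; omega
      · have h1 : y + 1 + ((i - y - 1).toNat : Int) * 1 = i := by omega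
        have h2 : x + 1 + ((i - y - 1).toNat : Int) * 1 = x + (i - y) := by omega
        rw [h1, h2]; exact hcell

theorem pvADiag_pair (board : List (List Int)) (W H x y : Int)
    (hx : 0 ≤ x ∧ x < W) (hy : 0 ≤ y ∧ y < H) :
    (pvScan board W H 1 (-1) (x + 1) (y + -1) (W.toNat + H.toNat + 1) = true ∨
     pvScan board W H (-1) 1 (x + -1) (y + 1) (W.toNat + H.toNat + 1) = true) ↔
    (∃ i : Int, 0 ≤ i ∧ i < H ∧ i ≠ y ∧ 0 ≤ x - (i - y) ∧ x - (i - y) < W ∧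
      pvGetCell board i (x - (i - y)) = 0) := by
  rw [pvScan_iff, pvScan_iff]
  constructor
  · rintro (⟨k, _, hpre, hcell⟩ | ⟨k, _, hpre, hcell⟩)
    · have hb := hpre k le_rfl
      refine ⟨y - 1 - k, by omega, by omega, by omega, by omega, by omega, ?_⟩
      have h1 : y + -1 + (k : Int) * (-1) = y - 1 - k := by ring
      have h2 : x + 1 + (k : Int) * 1 = x - (y - 1 - k - y) := by ring
      rwa [h1, h2] at hcell
    · have hb := hpre k le_rfl
      refine ⟨y + 1 + k, by omega, by omega, by omega, by omega, by omega, ?_⟩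
      have h1 : y + 1 + (k : Int) * 1 = y + 1 + k := by ring
      have h2 : x + -1 + (k : Int) * (-1) = x - (y + 1 + k - y) := by ring
      rwa [h1, h2] at hcell
  · rintro ⟨i, hi0, hiH, hiy, hj0, hjW, hcell⟩
    rcases lt_or_gt_of_ne hiy with hlt | hgt
    · left
      refine ⟨(y - 1 - i).toNat, by omega, ?_, ?_⟩
      · intro m hm; omega
      · have h1 : y + -1 + ((y - 1 - i).toNat : Int) * (-1) = i := by omega
        have h2 : x + 1 + ((y - 1 - i).toNat : Int) * 1 = x - (i - y) := by omega
        rw [h1, h2]; exact hcell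
    · right
      refine ⟨(i - y - 1).toNat, by omega, ?_, ?_⟩
      · intro m hm; omega
      · have h1 : y + 1 + ((i - y - 1).toNat : Int) * 1 = i := by omega
        have h2 : x + -1 + ((i - y - 1).toNat : Int) * (-1) = x - (i - y) := by omega
        rw [h1, h2]; exact hcell

theorem pvRowZero_iff (board : List (List Int)) (W x y : Int) :
    pvRowZero board W x y = true ↔ ∃ j : Int, 0 ≤ j ∧ j < W ∧ j ≠ x ∧ pvGetCell board y j = 0 := by
  unfold pvRowZero
  rw [List.any_eq_true]
  constructor
  · rintro ⟨j, hj, hp⟩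
    rw [PySem.List.mem_pyRange_one] at hj
    simp only [Bool.and_eq_true, bne_iff_ne, beq_iff_eq] at hp
    exact ⟨j, hj.1, hj.2, hp.1, hp.2⟩
  · rintro ⟨j, h1, h2, h3, h4⟩
    refine ⟨j, ?_, ?_⟩
    · rw [PySem.List.mem_pyRange_one]; exact ⟨h1, h2⟩
    · simp only [Bool.and_eq_true, bne_iff_ne, beq_iff_eq]; exact ⟨h3, h4⟩

theorem pvColZero_iff (board : List (List Int)) (H x y : Int) :
    pvColZero board H x y = true ↔ ∃ i : Int, 0 ≤ i ∧ i < H ∧ i ≠ y ∧ pvGetCell board i x = 0 := by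
  unfold pvColZero
  rw [List.any_eq_true]
  constructor
  · rintro ⟨i, hi, hp⟩
    rw [PySem.List.mem_pyRange_one] at hi
    simp only [Bool.and_eq_true, bne_iff_ne, beq_iff_eq] at hp
    exact ⟨i, hi.1, hi.2, hp.1, hp.2⟩
  · rintro ⟨i, h1, h2, h3, h4⟩
    refine ⟨i, ?_, ?_⟩
    · rw [PySem.List.mem_pyRange_one]; exact ⟨h1, h2⟩
    · simp only [Bool.and_eq_true, bne_iff_ne, beq_iff_eq]; exact ⟨h3, h4⟩

theorem pvDiagZero_iff (board : List (List Int)) (W H x y : Int) :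
    pvDiagZero board W H x y = true ↔
      ∃ i : Int, 0 ≤ i ∧ i < H ∧ i ≠ y ∧ 0 ≤ x + (i - y) ∧ x + (i - y) < W ∧
        pvGetCell board i (x + (i - y)) = 0 := by
  unfold pvDiagZero
  rw [List.any_eq_true]
  constructor
  · rintro ⟨i, hi, hp⟩
    rw [PySem.List.mem_pyRange_one] at hi
    simp only [Bool.and_eq_true, bne_iff_ne, beq_iff_eq, decide_eq_true_eq] at hp
    exact ⟨i, hi.1, hi.2, hp.1.1, hp.1.2.1, hp.1.2.2, hp.2⟩
  · rintro ⟨i, h1, h2, h3, h4, h5, h6⟩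
    refine ⟨i, ?_, ?_⟩
    · rw [PySem.List.mem_pyRange_one]; exact ⟨h1, h2⟩
    · simp only [Bool.and_eq_true, bne_iff_ne, beq_iff_eq, decide_eq_true_eq]
      exact ⟨⟨h3, h4, h5⟩, h6⟩

theorem pvADiagZero_iff (board : List (List Int)) (W H x y : Int) :
    pvADiagZero board W H x y = true ↔
      ∃ i : Int, 0 ≤ i ∧ i < H ∧ i ≠ y ∧ 0 ≤ x - (i - y) ∧ x - (i - y) < W ∧
        pvGetCell board i (x - (i - y)) = 0 := by
  unfold pvADiagZero
  rw [List.any_eq_true]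
  constructor
  · rintro ⟨i, hi, hp⟩
    rw [PySem.List.mem_pyRange_one] at hi
    simp only [Bool.and_eq_true, bne_iff_ne, beq_iff_eq, decide_eq_true_eq] at hp
    exact ⟨i, hi.1, hi.2, hp.1.1, hp.1.2.1, hp.1.2.2, hp.2⟩
  · rintro ⟨i, h1, h2, h3, h4, h5, h6⟩
    refine ⟨i, ?_, ?_⟩
    · rw [PySem.List.mem_pyRange_one]; exact ⟨h1, h2⟩
    · simp only [Bool.and_eq_true, bne_iff_ne, beq_iff_eq, decide_eq_true_eq]
      exact ⟨⟨h3, h4, h5⟩, h6⟩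

theorem pvIfChain (a b c d : Bool) :
    (if a then false else if b then false else if c then false else if d then false else true) =
      !(a || b || c || d) := by
  cases a <;> cases b <;> cases c <;> cases d <;> rfl

-- ===== VERDICT (by name: the statement is the Claim_ definition above) =====
theorem is_stable_spec : Claim_equal_is_stable := by
  intro board x y stone _ hPre
  obtain ⟨-, hyIn, -, hcase⟩ := hPre
  unfold Spec_is_stable is_stable is_stable_alt
  by_cases hg : pvGetCell board y x ≠ stone
  · rw [if_pos hg, if_pos hg]
  · have hmain : 0 ≤ x ∧ 0 ≤ y ∧ x < ((board.headD []).length : Int) := by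
      rcases hcase with h | h
      · exact ⟨h.1, h.2.1, h.2.2.2⟩
      · exact absurd h hg
    obtain ⟨hx0, hy0, hxW⟩ := hmain
    have hyH : y < (board.length : Int) := by
      simp only [PySem.Raise.InRange] at hyIn; omega
    rw [if_neg hg, if_neg hg]
    simp only [List.any_cons, List.any_nil, Bool.or_false]
    rw [pvIfChain]
    refine congrArg (fun t : Bool => !t) ?_
    rw [Bool.eq_iff_iff]
    simp only [Bool.or_eq_true]
    have hrow := pvRow_pair board ((board.headD []).length : Int) (board.length : Int) x y
      ⟨hx0, hxW⟩ ⟨hy0, hyH⟩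
    have hcol := pvCol_pair board ((board.headD []).length : Int) (board.length : Int) x y
      ⟨hx0, hxW⟩ ⟨hy0, hyH⟩
    have hdiag := pvDiag_pair board ((board.headD []).length : Int) (board.length : Int) x y
      ⟨hx0, hxW⟩ ⟨hy0, hyH⟩
    have hadiag := pvADiag_pair board ((board.headD []).length : Int) (board.length : Int) x y
      ⟨hx0, hxW⟩ ⟨hy0, hyH⟩
    have hrz := pvRowZero_iff board ((board.headD []).length : Int) x y
    have hcz := pvColZero_iff board ((board.length : Int)) x y
    have hdz := pvDiagZero_iff board ((board.headD []).length : Int) ((board.length : Int)) x y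
    have haz := pvADiagZero_iff board ((board.headD []).length : Int) ((board.length : Int)) x y
    constructor
    · intro h
      rcases h with h|h|h|h|h|h|h|h
      · exact Or.inl (Or.inr (hdz.mpr (hdiag.mp (Or.inr h))))
      · exact Or.inl (Or.inl (Or.inl (hrz.mpr (hrow.mp (Or.inr h)))))
      · exact Or.inr (haz.mpr (hadiag.mp (Or.inr h)))
      · exact Or.inl (Or.inl (Or.inr (hcz.mpr (hcol.mp (Or.inr h)))))
      · exact Or.inl (Or.inl (Or.inr (hcz.mpr (hcol.mp (Or.inl h)))))
      · exact Or.inr (haz.mpr (hadiag.mp (Or.inl h)))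
      · exact Or.inl (Or.inl (Or.inl (hrz.mpr (hrow.mp (Or.inl h)))))
      · exact Or.inl (Or.inr (hdz.mpr (hdiag.mp (Or.inl h))))
    · intro h
      rcases h with ((h|h)|h)|h
      · rcases hrow.mpr (hrz.mp h) with h7|h2
        · exact Or.inr (Or.inr (Or.inr (Or.inr (Or.inr (Or.inr (Or.inl h7))))))
        · exact Or.inr (Or.inl h2)
      · rcases hcol.mpr (hcz.mp h) with h5|h4
        · exact Or.inr (Or.inr (Or.inr (Or.inr (Or.inl h5))))
        · exact Or.inr (Or.inr (Or.inr (Or.inl h4)))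
      · rcases hdiag.mpr (hdz.mp h) with h8|h1
        · exact Or.inr (Or.inr (Or.inr (Or.inr (Or.inr (Or.inr (Or.inr h8))))))
        · exact Or.inl h1
      · rcases hadiag.mpr (haz.mp h) with h6|h3
        · exact Or.inr (Or.inr (Or.inr (Or.inr (Or.inr (Or.inl h6)))))
        · exact Or.inr (Or.inr (Or.inl h3))
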